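-- pv_equiv track=rewrite | github.com/RobertBogdanik/binghamacademy | assignments/chapter-15/tasks/15.15.py | countHelper
-- ===== SOURCE A (Python) =====
-- def countHelper(chars, high):
--     if high == 0:
--         if chars[0].isupper():
--             return 1
--         else:
--             return 0
--     else:
--         if chars[high].isupper():
--             return 1 + countHelper(chars, high - 1)
--         else:
--             return countHelper(chars, high - 1)
-- ===== SOURCE B (Python) =====
-- def countHelper(chars, high):
--     count = 0
--     i = high
--     while i != 0:
--         if chars[i].isupper():
--             count += 1
--         i -= 1
--     if chars[0].isupper():
--         count += 1
--     return count
-- ===== Notes on version B (the rewrite author's own statement) =====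
-- stated objective: alternative
-- what changed: Replaces A's non-tail recursion down the index by an iterative while-loop with an explicit count accumulator that walks i from high to 0, handling index 0 after the loop.
import Mathlib
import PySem

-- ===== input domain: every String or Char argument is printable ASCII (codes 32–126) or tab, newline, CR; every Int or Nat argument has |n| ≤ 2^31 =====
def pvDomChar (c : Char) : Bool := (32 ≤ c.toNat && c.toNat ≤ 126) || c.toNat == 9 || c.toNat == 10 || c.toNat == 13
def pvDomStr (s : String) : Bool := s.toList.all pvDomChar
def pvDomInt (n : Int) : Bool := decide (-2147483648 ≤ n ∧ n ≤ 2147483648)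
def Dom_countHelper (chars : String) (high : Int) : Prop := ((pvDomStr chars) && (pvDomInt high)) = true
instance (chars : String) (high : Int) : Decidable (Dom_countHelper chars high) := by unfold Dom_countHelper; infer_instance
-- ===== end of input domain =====

-- B replaces A's non-tail recursion down the index by an iterative while-loop with an explicit count accumulator.

-- ===== PORT A =====
-- A recurses from `high` down to 0, reading chars[i] at each step; the Nat fuel is high.toNat
-- (for high < 0 the Python recursion only ends in IndexError — outside Pre_; the port returns 0 there).
def countHelperGo (cs : List Char) : Nat → Int
  | 0 =>
      if (PySem.List.pyGet? cs ((0 : Nat) : Int)).elim false PySem.Chars.isupper then 1 else 0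
  | Nat.succ n =>
      if (PySem.List.pyGet? cs ((Nat.succ n : Nat) : Int)).elim false PySem.Chars.isupper then
        1 + countHelperGo cs n
      else
        countHelperGo cs n

def countHelper (chars : String) (high : Int) : Int :=
  if 0 ≤ high then countHelperGo chars.toList high.toNat else 0

-- ===== PORT B =====
-- Source B's `while i != 0` loop, i counting down from high; the accumulator `count` is threaded through
-- (for high < 0 the Python loop only ends in IndexError — outside Pre_; the port returns 0 there).
def countHelperAltLoop (cs : List Char) (count : Int) : Nat → Int
  | 0 => count
  | Nat.succ n =>
      countHelperAltLoop cs
        (if (PySem.List.pyGet? cs ((Nat.succ n : Nat) : Int)).elim false PySem.Chars.isupper then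
          count + 1
        else count) n

-- after the loop: `if chars[0].isupper(): count += 1; return count`
def countHelper_alt (chars : String) (high : Int) : Int :=
  if 0 ≤ high then
    let count := countHelperAltLoop chars.toList 0 high.toNat
    if (PySem.List.pyGet? chars.toList ((0 : Nat) : Int)).elim false PySem.Chars.isupper then
      count + 1
    else count
  else 0

-- ===== PRECONDITION & SPEC =====
-- Exactly the inputs where A returns normally: 0 ≤ high < len(chars); elsewhere A raises IndexError.
def Pre_countHelper (chars : String) (high : Int) : Prop :=
  0 ≤ high ∧ high < (chars.toList.length : Int)
instance (chars : String) (high : Int) : Decidable (Pre_countHelper chars high) := by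
  unfold Pre_countHelper; infer_instance

def pvWitness_countHelper : String × Int := ("Ab", 1)

def Spec_countHelper (chars : String) (high : Int) (out : Int) : Prop := out = countHelper_alt chars high
instance (chars : String) (high : Int) (out : Int) : Decidable (Spec_countHelper chars high out) := by unfold Spec_countHelper; infer_instance

-- ===== CLAIM (what is proved, stated in full; the proofs are below) =====
def Claim_equal_countHelper : Prop := ∀ (chars : String) (high : Int), Dom_countHelper chars high → Pre_countHelper chars high → Spec_countHelper chars high (countHelper chars high)

-- ===== LEMMAS AND PROOFS =====

-- B's loop accumulator splits off: running from `count` is `count` plus running from 0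
theorem countHelperAltLoop_acc (cs : List Char) (count : Int) (n : Nat) :
    countHelperAltLoop cs count n = count + countHelperAltLoop cs 0 n := by
  induction n generalizing count with
  | zero => simp [countHelperAltLoop]
  | succ n ih =>
      simp only [countHelperAltLoop]
      split
      · rw [ih (count + 1), ih ((0 : Int) + 1)]; omega
      · rw [ih count]

-- A's recursion = B's loop + B's post-loop chars[0] contribution
theorem countHelperGo_eq_altLoop (cs : List Char) (n : Nat) :
    countHelperGo cs n
      = countHelperAltLoop cs 0 n
        + (if (PySem.List.pyGet? cs ((0 : Nat) : Int)).elim false PySem.Chars.isupper then 1 else 0) := by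
  induction n with
  | zero => simp [countHelperGo, countHelperAltLoop]
  | succ n ih =>
      simp only [countHelperGo, countHelperAltLoop]
      rw [countHelperAltLoop_acc, ih]
      split <;> omega

-- ===== VERDICT (by name: the statement is the Claim_ definition above) =====
theorem countHelper_spec : Claim_equal_countHelper := by
  intro chars high _ hpre
  unfold Spec_countHelper countHelper countHelper_alt
  rw [if_pos hpre.1, if_pos hpre.1, countHelperGo_eq_altLoop]
  dsimp only
  split <;> omega
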